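-- pv_equiv track=rewrite | github.com/fireblade2534/Connect-4-MinMax | Test.py | init_move_order
-- ===== SOURCE A (Python) =====
-- def init_move_order(width):
--     center = width // 2
--     order = [center]
--     for offset in range(1, center + 1):
--         if center - offset >= 0:
--             order.append(center - offset)
--         if center + offset < width:
--             order.append(center + offset)
--     return order
-- ===== SOURCE B (Python) =====
-- def init_move_order(width):
--     center = width // 2
--     rest = [i for i in range(width) if i != center]
--     return [center] + sorted(rest, key=lambda i: (abs(i - center), i))
-- ===== Notes on version B (the rewrite author's own statement) =====
-- stated objective: alternative
-- what changed: Replaces A's bound-checked outward interleaving loop by a comparison sort: the center column first, then every other column ordered by a (distance-from-center, index) key.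
import Mathlib
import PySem

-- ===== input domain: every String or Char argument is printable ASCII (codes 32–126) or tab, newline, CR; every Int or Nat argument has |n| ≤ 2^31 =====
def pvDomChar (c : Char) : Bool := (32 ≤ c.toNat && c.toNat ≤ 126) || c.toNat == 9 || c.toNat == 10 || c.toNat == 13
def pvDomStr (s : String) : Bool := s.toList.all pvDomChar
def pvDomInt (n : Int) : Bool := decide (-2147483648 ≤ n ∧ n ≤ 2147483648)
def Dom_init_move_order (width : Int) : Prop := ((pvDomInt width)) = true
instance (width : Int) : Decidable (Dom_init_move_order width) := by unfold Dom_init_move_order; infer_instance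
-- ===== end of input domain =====

-- B replaces A's bound-checked outward interleaving loop by a comparison sort: center first, then the
-- remaining columns sorted by the key (distance from center, index) (alternative algorithm, same result).

-- ===== PORT A =====
def init_move_order (width : Int) : List Int :=
  let center := PySem.Int.floordiv width 2
  (PySem.List.pyRange 1 (center + 1) 1).foldl
    (fun order offset =>
      let order := if center - offset ≥ 0 then order ++ [center - offset] else order
      if center + offset < width then order ++ [center + offset] else order)
    [center]

-- ===== PORT B =====
def init_move_order_alt (width : Int) : List Int :=
  let center := PySem.Int.floordiv width 2
  let rest := (PySem.List.pyRange 0 width 1).filter (fun i => decide (i ≠ center))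
  [center] ++ PySem.List.sorted2 rest (fun i => (((i - center).natAbs : Int))) (fun i => i)

-- ===== PRECONDITION & SPEC =====
def Spec_init_move_order (width : Int) (out : List Int) : Prop := out = init_move_order_alt width
instance (width : Int) (out : List Int) : Decidable (Spec_init_move_order width out) := by unfold Spec_init_move_order; infer_instance

-- ===== CLAIM (what is proved, stated in full; the proofs are below) =====
def Claim_equal_init_move_order : Prop := ∀ (width : Int), Dom_init_move_order width → Spec_init_move_order width (init_move_order width)

-- ===== LEMMAS AND PROOFS =====

-- The strict order realised by B's sort key (distance from center, then index).
def pvLt (c a b : Int) : Prop := (a - c).natAbs < (b - c).natAbs ∨ ((a - c).natAbs = (b - c).natAbs ∧ a < b)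

-- The Bool comparator sorted2 uses for B's key pair.
def pvCmp (c : Int) : Int → Int → Bool := fun a b =>
  decide ((((a - c).natAbs : Int)) < (((b - c).natAbs : Int))) ||
    (!decide ((((b - c).natAbs : Int)) < (((a - c).natAbs : Int))) && decide (a < b))

theorem pvCmp_true {c a b : Int} (h : pvCmp c a b = true) : pvLt c a b := by
  unfold pvCmp at h
  simp only [Bool.or_eq_true, Bool.and_eq_true, Bool.not_eq_true', decide_eq_true_eq,
    decide_eq_false_iff_not] at h
  unfold pvLt; omega

theorem pvCmp_false {c a b : Int} (hne : a ≠ b) (h : pvCmp c a b = false) : pvLt c b a := by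
  unfold pvCmp at h
  simp only [Bool.or_eq_false_iff, Bool.and_eq_false_iff, Bool.not_eq_false', decide_eq_true_eq,
    decide_eq_false_iff_not] at h
  unfold pvLt; omega

theorem pvLt_trans {c a b d : Int} (h1 : pvLt c a b) (h2 : pvLt c b d) : pvLt c a d := by
  unfold pvLt at *; omega

theorem insertBy_pairwise_pvLt (c x : Int) (ys : List Int)
    (hys : ys.Pairwise (pvLt c)) (hx : x ∉ ys) :
    (PySem.List.insertBy (pvCmp c) x ys).Pairwise (pvLt c) := by
  induction ys with
  | nil => simp [PySem.List.insertBy]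
  | cons y ys ih =>
    rw [List.pairwise_cons] at hys
    simp only [List.mem_cons, not_or] at hx
    cases hcmp : pvCmp c x y with
    | true =>
      rw [show PySem.List.insertBy (pvCmp c) x (y :: ys) = x :: y :: ys from by
        simp [PySem.List.insertBy, hcmp]]
      refine List.Pairwise.cons ?_ (List.Pairwise.cons hys.1 hys.2)
      intro z hz
      rcases List.mem_cons.mp hz with rfl | hz
      · exact pvCmp_true hcmp
      · exact pvLt_trans (pvCmp_true hcmp) (hys.1 z hz)
    | false =>
      rw [show PySem.List.insertBy (pvCmp c) x (y :: ys) = y :: PySem.List.insertBy (pvCmp c) x ys from by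
        simp [PySem.List.insertBy, hcmp]]
      refine List.Pairwise.cons ?_ (ih hys.2 hx.2)
      intro z hz
      rcases (PySem.List.insertBy_mem_iff _ _ _ _).mp hz with rfl | hz
      · exact pvCmp_false hx.1 hcmp
      · exact hys.1 z hz

theorem foldl_insertBy_pairwise (c : Int) (xs : List Int) :
    ∀ acc : List Int, acc.Pairwise (pvLt c) → (∀ x ∈ xs, x ∉ acc) → xs.Nodup →
    (xs.foldl (fun a x => PySem.List.insertBy (pvCmp c) x a) acc).Pairwise (pvLt c) := by
  induction xs with
  | nil => intro acc h _ _; simpa using h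
  | cons x xs ih =>
    intro acc hacc hnot hnd
    rw [List.nodup_cons] at hnd
    simp only [List.foldl_cons]
    refine ih _ (insertBy_pairwise_pvLt c x acc hacc (hnot x (by simp))) ?_ hnd.2
    intro z hz hmem
    rcases (PySem.List.insertBy_mem_iff _ _ _ _).mp hmem with rfl | hmem
    · exact hnd.1 hz
    · exact hnot z (by simp [hz]) hmem

theorem sorted2_eq_foldl_pvCmp (c : Int) (xs : List Int) :
    PySem.List.sorted2 xs (fun i => (((i - c).natAbs : Int))) (fun i => i) false
      = xs.foldl (fun a x => PySem.List.insertBy (pvCmp c) x a) [] := rfl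

-- A's loop body and its state after the first n offsets.
def pvBody (c width : Int) (order : List Int) (offset : Int) : List Int :=
  let order := if c - offset ≥ 0 then order ++ [c - offset] else order
  if c + offset < width then order ++ [c + offset] else order

def pvA (c width : Int) (n : Nat) : List Int :=
  (PySem.List.pyRange 1 ((n : Int) + 1) 1).foldl (pvBody c width) [c]

theorem init_move_order_eq_pvA (width : Int) (h : 0 ≤ PySem.Int.floordiv width 2) :
    init_move_order width
      = pvA (PySem.Int.floordiv width 2) width (PySem.Int.floordiv width 2).toNat := by
  unfold init_move_order pvA pvBody
  rw [show (((PySem.Int.floordiv width 2).toNat : Int) + 1) = PySem.Int.floordiv width 2 + 1 from by omega]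

-- The columns A has emitted after n offsets, as one interval filtered by the right edge.
def pvT (c width : Int) (n : Nat) : List Int :=
  (PySem.List.pyRange (c - n) (c + n + 1) 1).filter (fun x => decide (x < width))

theorem pvA_inv (c width : Int) (_hc : 0 ≤ c) (hcw : c < width) :
    ∀ n : Nat, (n : Int) ≤ c →
      (pvA c width n).Perm (pvT c width n) ∧ (pvA c width n).Pairwise (pvLt c) ∧
        (∀ x ∈ pvA c width n, (x - c).natAbs ≤ n) := by
  intro n
  induction n with
  | zero =>
    intro _
    have hT : pvT c width 0 = [c] := by
      unfold pvT
      rw [show (c - ((0:Nat):Int)) = c from by push_cast; ring,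
          show (c + ((0:Nat):Int) + 1) = c + 1 from by push_cast; ring,
          PySem.List.pyRange_one_singleton]
      simp [hcw]
    refine ⟨by rw [hT]; rfl, by simp [pvA], ?_⟩
    intro x hx; simp [pvA] at hx; simp [hx]
  | succ n ih =>
    intro hn
    have hn' : (n : Int) ≤ c := by push_cast at hn ⊢; omega
    obtain ⟨hperm, hpair, hbound⟩ := ih hn'
    have hleft : c - ((n : Int) + 1) ≥ 0 := by push_cast at hn; omega
    have hstep : pvA c width (n + 1)
        = (pvA c width n ++ [c - ((n : Int) + 1)])
            ++ (if c + ((n : Int) + 1) < width then [c + ((n : Int) + 1)] else []) := by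
      unfold pvA
      rw [show (((n + 1 : Nat) : Int) + 1) = ((n : Int) + 1) + 1 from by push_cast; ring,
          PySem.List.pyRange_one_succ_right (show (1:Int) ≤ (n : Int) + 1 from by omega), List.foldl_append]
      simp only [List.foldl_cons, List.foldl_nil]
      unfold pvBody
      rw [if_pos hleft]
      split_ifs <;> simp
    have hTstep : pvT c width (n + 1)
        = [c - ((n : Int) + 1)] ++ pvT c width n
            ++ (if c + ((n : Int) + 1) < width then [c + ((n : Int) + 1)] else []) := by
      unfold pvT
      rw [show (c - ((n + 1 : Nat) : Int)) = c - ((n : Int) + 1) from by push_cast; ring,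
          show (c + ((n + 1 : Nat) : Int) + 1) = (c + (n : Int) + 1) + 1 from by push_cast; ring,
          PySem.List.pyRange_one_succ_right (show c - ((n : Int) + 1) ≤ c + (n : Int) + 1 from by omega),
          PySem.List.pyRange_one_cons (show (c - ((n : Int) + 1)) < c + (n : Int) + 1 from by omega),
          show c - ((n : Int) + 1) + 1 = c - (n : Int) from by ring,
          List.filter_append, List.filter_cons]
      have h1 : (decide (c - ((n : Int) + 1) < width)) = true := by simp; omega
      rw [h1]
      have h2 : List.filter (fun x => decide (x < width)) [c + (n : Int) + 1]
          = (if c + ((n : Int) + 1) < width then [c + ((n : Int) + 1)] else []) := by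
        rw [List.filter_cons]
        by_cases h : c + ((n : Int) + 1) < width
        · rw [if_pos h, show c + (n : Int) + 1 = c + ((n : Int) + 1) from by ring]
          simp [h]
        · rw [if_neg h]
          have hf : (decide (c + (n : Int) + 1 < width)) = false := by simp; omega
          simp [hf]
      rw [h2]
      simp
    have habs_left : ((c - ((n : Int) + 1)) - c).natAbs = n + 1 := by omega
    constructor
    · -- permutation
      rw [hstep, hTstep]
      have p1 : (pvA c width n ++ [c - ((n : Int) + 1)]).Perm
          ([c - ((n : Int) + 1)] ++ pvT c width n) :=
        List.perm_append_comm.trans (hperm.append_left _)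
      simpa [List.append_assoc] using p1.append_right _
    constructor
    · -- pairwise
      rw [hstep]
      rw [List.pairwise_append]
      refine ⟨?_, ?_, ?_⟩
      · rw [List.pairwise_append]
        refine ⟨hpair, by simp, ?_⟩
        intro a ha b hb
        rcases List.mem_singleton.mp hb with rfl
        have := hbound a ha
        left; omega
      · split_ifs <;> simp
      · intro a ha b hb
        have hb' : b = c + ((n : Int) + 1) := by
          rcases (by split_ifs at hb <;> simp_all : b = c + ((n : Int) + 1))
          rfl
        subst hb'
        rcases List.mem_append.mp ha with ha | ha
        · have := hbound a ha
          left; omega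
        · rcases List.mem_singleton.mp ha with rfl
          right; constructor <;> omega
    · -- bound
      intro x hx
      rw [hstep] at hx
      rcases List.mem_append.mp hx with hx | hx
      · rcases List.mem_append.mp hx with hx | hx
        · have := hbound x hx; omega
        · rcases List.mem_singleton.mp hx with rfl; omega
      · have hx' : x = c + ((n : Int) + 1) := by split_ifs at hx <;> simp_all
        subst hx'; omega

theorem pvT_top (c width : Int) (hc : 0 ≤ c) (hw0 : 0 < width) (hw2 : width ≤ 2 * c + 1) :
    pvT c width c.toNat = PySem.List.pyRange 0 width 1 := by
  unfold pvT
  rw [show (c - (c.toNat : Int)) = 0 from by omega,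
      show (c + (c.toNat : Int) + 1) = 2 * c + 1 from by omega]
  rw [PySem.List.pyRange_one_append 0 width (2 * c + 1) (by omega) hw2]
  rw [List.filter_append]
  have h1 : (PySem.List.pyRange 0 width 1).filter (fun x => decide (x < width))
      = PySem.List.pyRange 0 width 1 := by
    apply List.filter_eq_self.mpr
    intro a ha
    have := (PySem.List.mem_pyRange_one).mp ha
    simp; omega
  have h2 : (PySem.List.pyRange width (2 * c + 1) 1).filter (fun x => decide (x < width))
      = [] := by
    apply List.filter_eq_nil_iff.mpr
    intro a ha
    have := (PySem.List.mem_pyRange_one).mp ha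
    simp; omega
  rw [h1, h2, List.append_nil]

theorem pvLt_antisymm {c a b : Int} (h1 : pvLt c a b) (h2 : pvLt c b a) : a = b := by
  unfold pvLt at *; omega

theorem init_move_order_eq (width : Int) :
    init_move_order width = init_move_order_alt width := by
  set c := PySem.Int.floordiv width 2 with hc
  have hb : c * 2 ≤ width ∧ width < (c + 1) * 2 :=
    (PySem.Int.floordiv_eq_iff_of_pos (by norm_num)).mp hc.symm
  rcases lt_or_ge 0 width with hw | hw
  · -- main case: 0 < width
    have hc0 : 0 ≤ c := by omega
    have hcw : c < width := by omega
    have hw2 : width ≤ 2 * c + 1 := by omega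
    have hA : init_move_order width = pvA c width c.toNat := by
      have h := init_move_order_eq_pvA width (by omega)
      rw [← hc] at h
      exact h
    obtain ⟨hperm, hpair, _⟩ := pvA_inv c width hc0 hcw c.toNat (by omega)
    -- B's side
    unfold init_move_order_alt
    dsimp only
    rw [← hc]
    set rest := (PySem.List.pyRange 0 width 1).filter (fun i => decide (i ≠ c)) with hrest
    set S := PySem.List.sorted2 rest (fun i => (((i - c).natAbs : Int))) (fun i => i) with hS
    have hSperm : S.Perm rest := PySem.List.sorted2_perm rest _ _ false
    have hSpair : S.Pairwise (pvLt c) := by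
      rw [hS, sorted2_eq_foldl_pvCmp]
      exact foldl_insertBy_pairwise c rest [] (by simp) (by simp)
        (List.Nodup.filter _ (PySem.List.nodup_pyRange_one 0 width))
    have hmemrest : ∀ y ∈ rest, y ≠ c := by
      intro y hy
      have := List.of_mem_filter hy
      simpa using this
    have hBpair : (c :: S).Pairwise (pvLt c) := by
      refine List.Pairwise.cons ?_ hSpair
      intro y hy
      have hy' : y ≠ c := hmemrest y (hSperm.mem_iff.mp hy)
      left; omega
    have hrestEq : rest = PySem.List.pyRange 0 c 1 ++ PySem.List.pyRange (c + 1) width 1 := by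
      rw [hrest, PySem.List.pyRange_one_append 0 c width hc0 (by omega),
          PySem.List.pyRange_one_cons hcw, List.filter_append, List.filter_cons]
      have : (decide (c ≠ c)) = false := by simp
      simp only [this, Bool.false_eq_true, if_false]
      rw [List.filter_eq_self.mpr, List.filter_eq_self.mpr]
      · intro a ha; have := PySem.List.mem_pyRange_one.mp ha; simp; omega
      · intro a ha; have := PySem.List.mem_pyRange_one.mp ha; simp; omega
    have hBperm : (c :: S).Perm (PySem.List.pyRange 0 width 1) := by
      refine (hSperm.cons c).trans ?_
      rw [hrestEq]
      refine List.perm_middle.symm.trans ?_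
      rw [← PySem.List.pyRange_one_cons hcw,
          ← PySem.List.pyRange_one_append 0 c width hc0 (by omega)]
    have hfinal : pvA c width c.toNat = c :: S := by
      refine List.Perm.eq_of_pairwise (fun a b _ _ h1 h2 => pvLt_antisymm h1 h2) hpair hBpair ?_
      refine hperm.trans ?_
      rw [pvT_top c width hc0 hw hw2]
      exact hBperm.symm
    rw [hA, hfinal]
    rfl
  · -- width ≤ 0: both sides are [center]
    have hc0 : c ≤ 0 := by omega
    have hA : init_move_order width = [c] := by
      unfold init_move_order
      dsimp only
      rw [← hc, PySem.List.pyRange_one_eq_nil (by omega)]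
      rfl
    have hB : init_move_order_alt width = [c] := by
      unfold init_move_order_alt
      dsimp only
      rw [← hc, PySem.List.pyRange_one_eq_nil (by omega)]
      rfl
    rw [hA, hB]

-- ===== VERDICT (by name: the statement is the Claim_ definition above) =====
theorem init_move_order_spec : Claim_equal_init_move_order := by
  intro width _
  exact init_move_order_eq width
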